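-- pv_equiv track=rewrite | github.com/2020-AL-STUDY/Algorithms | 210214/2021KAKAO-2_ksy.py | dictMax
-- ===== SOURCE A (Python) =====
-- def dictMax(dict, course):
--     tmp = {}
--     for c in course:
--         tmp[c] = []
--
--     keys = dict.keys()
--     for d in keys:
--         if dict[d] > 1:
--             l = len(d)
--             if l in course:
--                 te = tmp[l]
--                 if not te or dict[te[0]] == dict[d]:
--                     te.append(d)
--                 elif dict[te[0]] < dict[d]:
--                     tmp[l] = [d]
--
--     res = []
--     for i in tmp:
--         res += tmp[i]
--
--     return res
-- ===== SOURCE B (Python) =====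
-- def dictMax(dict, course):
--     # pass 1: best value per course length among entries with value > 1
--     best = {}
--     for k in dict:
--         v = dict[k]
--         if v > 1:
--             l = len(k)
--             if l in course:
--                 if l not in best or v > best[l]:
--                     best[l] = v
--     # pass 2: per distinct course length, in first-occurrence order, emit the
--     # keys attaining that best value, in dict order
--     res = []
--     seen = []
--     for c in course:
--         if c not in seen:
--             seen.append(c)
--             if c in best:
--                 m = best[c]
--                 res += [k for k in dict if dict[k] > 1 and len(k) == c and dict[k] == m]
--     return res
-- ===== Notes on version B (the rewrite author's own statement) =====
-- stated objective: alternative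
-- what changed: A maintains per-length argmax groups in one scan with conditional append/reset inside a dict of lists; B first computes a per-length maximum-value table, then rebuilds the result by filtering the dict keys once per distinct course length.
import Mathlib
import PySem

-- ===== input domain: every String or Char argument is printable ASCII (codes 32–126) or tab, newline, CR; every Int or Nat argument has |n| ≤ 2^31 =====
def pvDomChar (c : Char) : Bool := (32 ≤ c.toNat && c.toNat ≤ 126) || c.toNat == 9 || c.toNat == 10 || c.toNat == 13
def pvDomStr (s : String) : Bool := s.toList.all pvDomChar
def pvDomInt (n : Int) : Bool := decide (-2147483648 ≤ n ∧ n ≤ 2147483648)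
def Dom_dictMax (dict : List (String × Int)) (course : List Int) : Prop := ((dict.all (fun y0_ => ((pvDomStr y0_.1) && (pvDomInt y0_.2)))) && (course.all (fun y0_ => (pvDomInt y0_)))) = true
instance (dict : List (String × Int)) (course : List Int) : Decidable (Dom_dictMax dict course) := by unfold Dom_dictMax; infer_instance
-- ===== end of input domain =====

-- B replaces A's one-scan conditional append/reset group maintenance by a two-pass
-- max-table-then-filter rebuild; alternative decomposition, same asymptotic cost.

-- ===== PORT A =====
-- loop body of A's main scan (the Python for-loop body, named for the proofs)
def bodyA (D : PySem.Dict String Int) (course : List Int)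
    (t : PySem.Dict Int (List String)) (d : String) : PySem.Dict Int (List String) :=
  if D.getD d 0 > 1 then
    let l := PySem.Str.len d
    if course.contains l then
      let te := t.getD l []
      if te = [] ∨ D.getD (te.headD "") 0 = D.getD d 0 then
        t.insert l (te ++ [d])
      else if D.getD (te.headD "") 0 < D.getD d 0 then
        t.insert l [d]
      else t
    else t
  else t

def dictMax (dict : List (String × Int)) (course : List Int) : List String :=
  let D := PySem.Dict.ofList dict
  let tmp0 : PySem.Dict Int (List String) :=
    course.foldl (fun t c => t.insert c []) PySem.Dict.empty
  let keys := D.keys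
  let tmp := keys.foldl (bodyA D course) tmp0
  tmp.keys.foldl (fun r i => r ++ tmp.getD i []) []

-- ===== PORT B =====
-- loop body of B's first pass (best-value table)
def bodyBest (D : PySem.Dict String Int) (course : List Int)
    (b : PySem.Dict Int Int) (k : String) : PySem.Dict Int Int :=
  let v := D.getD k 0
  if v > 1 then
    let l := PySem.Str.len k
    if course.contains l then
      if b.contains l = false ∨ v > b.getD l 0 then b.insert l v else b
    else b
  else b

-- loop body of B's second pass (seen-dedup + emit keys attaining the best value)
def stepRes (D : PySem.Dict String Int) (best : PySem.Dict Int Int)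
    (p : List Int × List String) (c : Int) : List Int × List String :=
  if (p.1 : PySem.Set Int).contains c then p
  else
    let seen := PySem.Set.add p.1 c
    if best.contains c then
      let m := best.getD c 0
      (seen, p.2 ++ D.keys.filter (fun k =>
        decide (D.getD k 0 > 1) && (PySem.Str.len k == c) && (D.getD k 0 == m)))
    else (seen, p.2)

def dictMax_alt (dict : List (String × Int)) (course : List Int) : List String :=
  let D := PySem.Dict.ofList dict
  let best : PySem.Dict Int Int := D.keys.foldl (bodyBest D course) PySem.Dict.empty
  (course.foldl (stepRes D best) (([], []) : List Int × List String)).2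

-- ===== PRECONDITION & SPEC =====
def Spec_dictMax (dict : List (String × Int)) (course : List Int) (out : List String) : Prop := out = dictMax_alt dict course
instance (dict : List (String × Int)) (course : List Int) (out : List String) : Decidable (Spec_dictMax dict course out) := by unfold Spec_dictMax; infer_instance

-- ===== CLAIM (what is proved, stated in full; the proofs are below) =====
def Claim_equal_dictMax : Prop := ∀ (dict : List (String × Int)) (course : List Int), Dom_dictMax dict course → Spec_dictMax dict course (dictMax dict course)

-- ===== LEMMAS AND PROOFS =====

-- A's group-update step, per length
def stepg (D : PySem.Dict String Int) (g : List String) (d : String) : List String :=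
  if g = [] ∨ D.getD (g.headD "") 0 = D.getD d 0 then g ++ [d]
  else if D.getD (g.headD "") 0 < D.getD d 0 then [d] else g

-- running maximum of values
def fo (D : PySem.Dict String Int) (cs : List String) (m : Int) : Int :=
  cs.foldl (fun m d => if D.getD d 0 > m then D.getD d 0 else m) m

lemma le_fo (D : PySem.Dict String Int) (cs : List String) (m : Int) : m ≤ fo D cs m := by
  induction cs generalizing m with
  | nil => simp [fo]
  | cons c cs ih =>
      simp only [fo, List.foldl_cons]
      refine le_trans ?_ (ih _)
      split <;> omega

-- the argmax-group fold equals "filter by final maximum"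
lemma core_aux (D : PySem.Dict String Int) (cs : List String) (g : List String) (m : Int)
    (hg : g ≠ []) (hv : ∀ x ∈ g, D.getD x 0 = m) :
    cs.foldl (stepg D) g =
      (if fo D cs m = m then g else []) ++ cs.filter (fun x => D.getD x 0 == fo D cs m) := by
  induction cs generalizing g m with
  | nil => simp [fo]
  | cons c cs ih =>
      have hhead : D.getD (g.headD "") 0 = m := by
        cases g with
        | nil => exact absurd rfl hg
        | cons a g' => exact hv a (by simp)
      by_cases hc : D.getD c 0 = m
      · have hcond : g = [] ∨ D.getD (g.headD "") 0 = D.getD c 0 := Or.inr (by rw [hhead, hc])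
        have hstep : stepg D g c = g ++ [c] := by simp only [stepg]; rw [if_pos hcond]
        have ih' := ih (g ++ [c]) m (by simp) (by
          intro x hx
          rcases List.mem_append.1 hx with h | h
          · exact hv x h
          · simp at h; subst h; exact hc)
        have hfo : fo D (c :: cs) m = fo D cs m := by
          simp [fo, hc]
        rw [List.foldl_cons, hstep, ih', hfo, List.filter_cons]
        by_cases hfm : fo D cs m = m
        · have : (D.getD c 0 == fo D cs m) = true := by rw [hc, hfm]; exact beq_self_eq_true m
          simp [hfm, hc]
        · have : (D.getD c 0 == fo D cs m) = false := by
            rw [hc]; exact beq_false_of_ne (fun h => hfm h.symm)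
          simp [hfm, hc]
          exact fun h => hfm h.symm
      · have hcond : ¬ (g = [] ∨ D.getD (g.headD "") 0 = D.getD c 0) := by
          rintro (h | h)
          · exact hg h
          · rw [hhead] at h; exact hc h.symm
        by_cases hlt : m < D.getD c 0
        · have hstep : stepg D g c = [c] := by
            simp only [stepg]; rw [if_neg hcond, if_pos (by rw [hhead]; exact hlt)]
          have ih' := ih [c] (D.getD c 0) (by simp) (by simp)
          have hfo : fo D (c :: cs) m = fo D cs (D.getD c 0) := by
            simp only [fo, List.foldl_cons]
            rw [if_pos hlt]
          have hge : D.getD c 0 ≤ fo D cs (D.getD c 0) := le_fo D cs _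
          have hne : ¬ (fo D cs (D.getD c 0) = m) := by omega
          rw [List.foldl_cons, hstep, ih', hfo, List.filter_cons]
          by_cases hfc : fo D cs (D.getD c 0) = D.getD c 0
          · have : (D.getD c 0 == fo D cs (D.getD c 0)) = true := by rw [hfc]; exact beq_self_eq_true _
            simp [hfc, this, hc]
          · have : (D.getD c 0 == fo D cs (D.getD c 0)) = false :=
              beq_false_of_ne (fun h => hfc h.symm)
            simp [hne, hfc, this, hc]
        · have hstep : stepg D g c = g := by
            simp only [stepg]
            rw [if_neg hcond, if_neg (by rw [hhead]; exact hlt)]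
          have hfo : fo D (c :: cs) m = fo D cs m := by
            simp only [fo, List.foldl_cons]
            rw [if_neg (by omega)]
          have hge : m ≤ fo D cs m := le_fo D cs m
          rw [List.foldl_cons, hstep, ih g m hg hv, hfo, List.filter_cons]
          have : (D.getD c 0 == fo D cs m) = false := beq_false_of_ne (by omega)
          simp [this]

-- value emitted by B for one course length
def emit (D : PySem.Dict String Int) (best : PySem.Dict Int Int) (c : Int) : List String :=
  if best.contains c then
    D.keys.filter (fun k =>
      decide (D.getD k 0 > 1) && (PySem.Str.len k == c) && (D.getD k 0 == best.getD c 0))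
  else []

-- B's best-table update, seen from one key (running max as an option)
def obo (D : PySem.Dict String Int) (cs : List String) (o : Option Int) : Option Int :=
  cs.foldl (fun o d => match o with
    | none => some (D.getD d 0)
    | some m => if D.getD d 0 > m then some (D.getD d 0) else some m) o

lemma obo_some (D : PySem.Dict String Int) (cs : List String) (m : Int) :
    obo D cs (some m) = some (fo D cs m) := by
  induction cs generalizing m with
  | nil => simp [obo, fo]
  | cons c cs ih =>
      simp only [obo, fo, List.foldl_cons] at *
      split <;> simp [ih]

lemma foldl_app {α β : Type} (l : List α) (f : α → List β) (r : List β) :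
    l.foldl (fun r i => r ++ f i) r = r ++ l.flatMap f := by
  induction l generalizing r with
  | nil => simp
  | cons a l ih => simp [ih]

lemma flatMap_congr {α β : Type} (l : List α) (f g : α → List β)
    (h : ∀ x ∈ l, f x = g x) : l.flatMap f = l.flatMap g := by
  induction l with
  | nil => rfl
  | cons a l ih =>
      simp only [List.flatMap_cons]
      rw [h a (by simp), ih (fun x hx => h x (by simp [hx]))]

lemma filter_and3 {α : Type} (l : List α) (p q r : α → Bool) :
    l.filter (fun a => p a && q a && r a) = (l.filter (fun a => p a && q a)).filter r := by
  induction l with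
  | nil => rfl
  | cons a l ih =>
      simp only [List.filter_cons]
      cases hp : p a <;> cases hq : q a <;> cases hr : r a <;>
        simp [hp, hq, hr, ih]

-- one step of A's scan, at a fixed in-course length c
lemma getD_bodyA (D : PySem.Dict String Int) (course : List Int)
    (t : PySem.Dict Int (List String)) (d : String) (c : Int)
    (hc : course.contains c = true) :
    (bodyA D course t d).getD c [] =
      if decide (D.getD d 0 > 1) && (PySem.Str.len d == c)
      then stepg D (t.getD c []) d else t.getD c [] := by
  unfold bodyA
  by_cases h1 : D.getD d 0 > 1
  · by_cases h2 : PySem.Str.len d = c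
    · subst h2
      have hcond : (decide (D.getD d 0 > 1) && (PySem.Str.len d == PySem.Str.len d)) = true := by
        simp [h1]
      rw [if_pos hcond, if_pos h1, if_pos hc]
      dsimp only
      split_ifs with hap hlt
      · rw [PySem.Dict.getD_insert_self]
        simp only [stepg]
        rw [if_pos hap]
      · rw [PySem.Dict.getD_insert_self]
        simp only [stepg]
        rw [if_neg hap, if_pos hlt]
      · simp only [stepg]
        rw [if_neg hap, if_neg hlt]
    · have hne : ¬ ((decide (D.getD d 0 > 1) && (PySem.Str.len d == c)) = true) := by
        simp only [Bool.and_eq_true, decide_eq_true_eq, beq_iff_eq, not_and]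
        exact fun _ h => h2 h
      rw [if_neg hne, if_pos h1]
      dsimp only
      split_ifs with hcl hap hlt
      · rw [PySem.Dict.getD_insert, if_neg (fun h => h2 h.symm)]
      · rw [PySem.Dict.getD_insert, if_neg (fun h => h2 h.symm)]
      · rfl
      · rfl
  · simp [h1]

lemma A_loop (D : PySem.Dict String Int) (course : List Int) (c : Int)
    (hc : course.contains c = true) (ks : List String) :
    ∀ t : PySem.Dict Int (List String),
    (ks.foldl (bodyA D course) t).getD c []
      = (ks.filter (fun d => decide (D.getD d 0 > 1) && (PySem.Str.len d == c))).foldl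
          (stepg D) (t.getD c []) := by
  induction ks with
  | nil => intro t; simp
  | cons d ks ih =>
      intro t
      simp only [List.foldl_cons, List.filter_cons]
      rw [ih (bodyA D course t d)]
      by_cases hd : (decide (D.getD d 0 > 1) && (PySem.Str.len d == c)) = true
      · rw [if_pos hd, List.foldl_cons, getD_bodyA D course t d c hc, if_pos hd]
      · rw [if_neg hd, getD_bodyA D course t d c hc,
          if_neg hd]

-- A's scan never changes which keys tmp has
lemma keys_A_loop (D : PySem.Dict String Int) (course : List Int) (ks : List String) :
    ∀ t : PySem.Dict Int (List String), (∀ x ∈ course, t.contains x = true) →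
    (ks.foldl (bodyA D course) t).keys = t.keys := by
  induction ks with
  | nil => intro t _; rfl
  | cons d ks ih =>
      intro t ht
      have hk : (bodyA D course t d).keys = t.keys := by
        unfold bodyA
        dsimp only
        split_ifs with h1 hcl hap hlt
        · exact PySem.Dict.keys_insert_of_contains _ _
            (ht _ (List.contains_iff_mem.mp hcl))
        · exact PySem.Dict.keys_insert_of_contains _ _
            (ht _ (List.contains_iff_mem.mp hcl))
        · rfl
        · rfl
        · rfl
      have hc : ∀ x ∈ course, (bodyA D course t d).contains x = true := by
        intro x hx
        rw [PySem.Dict.contains_eq_decide_mem_keys, hk,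
          ← PySem.Dict.contains_eq_decide_mem_keys]
        exact ht x hx
      rw [List.foldl_cons, ih (bodyA D course t d) hc, hk]

-- the initialisation loop leaves every slot empty
lemma getD_init (cs : List Int) :
    ∀ (t : PySem.Dict Int (List String)) (c : Int), t.getD c [] = [] →
    (cs.foldl (fun t c => t.insert c []) t).getD c [] = [] := by
  induction cs with
  | nil => intro t c h; exact h
  | cons a cs ih =>
      intro t c h
      rw [List.foldl_cons]
      refine ih _ c ?_
      rw [PySem.Dict.getD_insert]
      split <;> simp [h]

-- one step of B's best-table pass, at a fixed in-course length c
lemma get?_bodyBest (D : PySem.Dict String Int) (course : List Int)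
    (b : PySem.Dict Int Int) (k : String) (c : Int)
    (hc : course.contains c = true) :
    (bodyBest D course b k).get? c =
      if decide (D.getD k 0 > 1) && (PySem.Str.len k == c)
      then (match b.get? c with
            | none => some (D.getD k 0)
            | some m => if D.getD k 0 > m then some (D.getD k 0) else some m)
      else b.get? c := by
  unfold bodyBest
  by_cases h1 : D.getD k 0 > 1
  · by_cases h2 : PySem.Str.len k = c
    · subst h2
      have hcond : (decide (D.getD k 0 > 1) && (PySem.Str.len k == PySem.Str.len k)) = true := by
        simp [h1]
      rw [if_pos hcond, if_pos h1, if_pos hc]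
      cases hbc : b.get? (PySem.Str.len k) with
      | none =>
          have hf : b.contains (PySem.Str.len k) = false := by
            rw [PySem.Dict.contains_eq_isSome_get?, hbc]; rfl
          rw [if_pos (Or.inl hf), PySem.Dict.get?_insert_self]
      | some m =>
          have hbt : b.contains (PySem.Str.len k) = true := by
            rw [PySem.Dict.contains_eq_isSome_get?, hbc]; rfl
          have hgd : b.getD (PySem.Str.len k) 0 = m := by
            rw [PySem.Dict.getD_eq_get?_getD, hbc]; rfl
          by_cases hgt : D.getD k 0 > m
          · rw [if_pos (Or.inr (by rw [hgd]; exact hgt)), PySem.Dict.get?_insert_self]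
            dsimp only
            rw [if_pos hgt]
          · rw [if_neg (by
                rintro (h | h)
                · rw [hbt] at h; cases h
                · rw [hgd] at h; exact hgt h), hbc]
            simp [hgt]
    · have hne : ¬ ((decide (D.getD k 0 > 1) && (PySem.Str.len k == c)) = true) := by
        simp only [Bool.and_eq_true, decide_eq_true_eq, beq_iff_eq, not_and]
        exact fun _ h => h2 h
      rw [if_neg hne, if_pos h1]
      dsimp only
      split_ifs with hcl hins
      · rw [PySem.Dict.get?_insert, if_neg (fun h => h2 h.symm)]
      · rfl
      · rfl
  · simp [h1]

lemma best_loop (D : PySem.Dict String Int) (course : List Int) (c : Int)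
    (hc : course.contains c = true) (ks : List String) :
    ∀ b : PySem.Dict Int Int,
    (ks.foldl (bodyBest D course) b).get? c
      = obo D (ks.filter (fun d => decide (D.getD d 0 > 1) && (PySem.Str.len d == c)))
          (b.get? c) := by
  induction ks with
  | nil => intro b; simp [obo]
  | cons k ks ih =>
      intro b
      simp only [List.foldl_cons, List.filter_cons]
      rw [ih (bodyBest D course b k)]
      by_cases hk : (decide (D.getD k 0 > 1) && (PySem.Str.len k == c)) = true
      · rw [if_pos hk, get?_bodyBest D course b k c hc, if_pos hk]
        simp only [obo, List.foldl_cons]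
      · rw [if_neg hk, get?_bodyBest D course b k c hc, if_neg hk]

-- the set built by Set.update extends its start
lemma update_prefix (cs : List Int) :
    ∀ s : PySem.Set Int, ∃ t, PySem.Set.update s cs = s ++ t := by
  induction cs with
  | nil => intro s; exact ⟨[], by simp [PySem.Set.update]⟩
  | cons c cs ih =>
      intro s
      have hcons : PySem.Set.update s (c :: cs) = PySem.Set.update (PySem.Set.add s c) cs := by
        simp [PySem.Set.update]
      by_cases hm : c ∈ s
      · have hadd : PySem.Set.add s c = s := by simp [PySem.Set.add, hm]
        rcases ih s with ⟨t, ht⟩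
        exact ⟨t, by rw [hcons, hadd, ht]⟩
      · have hadd : PySem.Set.add s c = s ++ [c] := by simp [PySem.Set.add, hm]
        rcases ih (s ++ [c]) with ⟨t, ht⟩
        refine ⟨c :: t, ?_⟩
        rw [hcons, hadd, ht]
        simp

-- B's second pass, unrolled: emit once per not-yet-seen course value
lemma res_loop (D : PySem.Dict String Int) (best : PySem.Dict Int Int) (cs : List Int) :
    ∀ (seen : PySem.Set Int) (res : List String),
    (cs.foldl (stepRes D best) (seen, res)).2
      = res ++ ((PySem.Set.update seen cs).drop seen.length).flatMap (emit D best) := by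
  induction cs with
  | nil =>
      intro seen res
      simp [PySem.Set.update]
  | cons c cs ih =>
      intro seen res
      have hupd : PySem.Set.update seen (c :: cs) = PySem.Set.update (PySem.Set.add seen c) cs := by
        simp [PySem.Set.update]
      by_cases hm : c ∈ seen
      · have hadd : PySem.Set.add seen c = seen := by simp [PySem.Set.add, hm]
        have hstep : stepRes D best (seen, res) c = (seen, res) := by
          unfold stepRes
          dsimp only
          rw [if_pos (List.contains_iff_mem.mpr hm)]
        rw [List.foldl_cons, hstep, ih seen res, hupd, hadd]
      · have hadd : PySem.Set.add seen c = seen ++ [c] := by simp [PySem.Set.add, hm]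
        have hstep : stepRes D best (seen, res) c = (seen ++ [c], res ++ emit D best c) := by
          unfold stepRes emit
          dsimp only
          rw [if_neg (fun h => hm (List.contains_iff_mem.mp h)), hadd]
          split_ifs with hb
          · rfl
          · simp
        rw [List.foldl_cons, hstep, ih (seen ++ [c]) (res ++ emit D best c), hupd, hadd]
        rcases update_prefix cs (seen ++ [c]) with ⟨t, ht⟩
        rw [ht]
        have h1 : List.drop (seen ++ [c]).length ((seen ++ [c]) ++ t) = t := List.drop_left
        have h2 : List.drop seen.length ((seen ++ [c]) ++ t) = c :: t := by
          rw [List.append_assoc]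
          exact List.drop_left (l₁ := seen) (l₂ := [c] ++ t)
        rw [h1, h2]
        simp

-- per length: A's maintained group is exactly "keys attaining the running maximum"
lemma grp_eq (D : PySem.Dict String Int) (cs : List String) :
    cs.foldl (stepg D) [] =
      (match obo D cs none with
       | none => []
       | some M => cs.filter (fun x => D.getD x 0 == M)) := by
  cases cs with
  | nil => rfl
  | cons d cs =>
      have hobo : obo D (d :: cs) none = some (fo D cs (D.getD d 0)) := by
        simp only [obo, List.foldl_cons]
        exact obo_some D cs (D.getD d 0)
      have hstep : stepg D [] d = [d] := by simp [stepg]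
      rw [List.foldl_cons, hstep, hobo,
        core_aux D cs [d] (D.getD d 0) (by simp) (by simp)]
      dsimp only
      rw [List.filter_cons]
      by_cases hfd : fo D cs (D.getD d 0) = D.getD d 0
      · have : (D.getD d 0 == fo D cs (D.getD d 0)) = true := by
          rw [hfd]; exact beq_self_eq_true _
        simp [hfd]
      · have : (D.getD d 0 == fo D cs (D.getD d 0)) = false :=
          beq_false_of_ne (fun h => hfd h.symm)
        simp [hfd, this]

-- ===== MAIN PROOF =====
lemma dictMax_eq (dict : List (String × Int)) (course : List Int) :
    dictMax dict course = dictMax_alt dict course := by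
  unfold dictMax dictMax_alt
  set D := PySem.Dict.ofList dict with hD
  set tmp0 : PySem.Dict Int (List String) :=
    course.foldl (fun t c => t.insert c []) PySem.Dict.empty with htmp0
  set tmp := D.keys.foldl (bodyA D course) tmp0 with htmp
  set best := D.keys.foldl (bodyBest D course) PySem.Dict.empty with hbest
  have hkeys0 : tmp0.keys = PySem.Set.ofList course := by
    rw [htmp0, PySem.Dict.keys_foldl_insert]
    simp [PySem.Set.update_nil_left]
  have hcont0 : ∀ x ∈ course, tmp0.contains x = true := by
    intro x hx
    rw [PySem.Dict.contains_eq_decide_mem_keys, hkeys0]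
    simp [PySem.Set.mem_ofList, hx]
  have hkeys : tmp.keys = PySem.Set.ofList course := by
    rw [htmp, keys_A_loop D course D.keys tmp0 hcont0, hkeys0]
  -- A's result
  rw [foldl_app, hkeys]
  -- B's result
  rw [res_loop D best course [] []]
  have hupd : PySem.Set.update ([] : PySem.Set Int) course = PySem.Set.ofList course :=
    PySem.Set.update_nil_left course
  rw [hupd]
  simp only [List.length_nil, List.drop_zero, List.nil_append]
  -- pointwise over the deduplicated course
  refine flatMap_congr _ _ _ ?_
  intro c hcmem
  have hc : course.contains c = true := by
    rw [List.contains_iff_mem]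
    exact (PySem.Set.mem_ofList _ _).mp hcmem
  have hA : tmp.getD c [] =
      (D.keys.filter (fun d => decide (D.getD d 0 > 1) && (PySem.Str.len d == c))).foldl
        (stepg D) [] := by
    rw [htmp, A_loop D course c hc D.keys tmp0]
    rw [getD_init course PySem.Dict.empty c (by simp)]
  have hB : best.get? c =
      obo D (D.keys.filter (fun d => decide (D.getD d 0 > 1) && (PySem.Str.len d == c))) none := by
    rw [hbest, best_loop D course c hc D.keys]
    simp
  set cs := D.keys.filter (fun d => decide (D.getD d 0 > 1) && (PySem.Str.len d == c)) with hcs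
  rw [hA, grp_eq D cs]
  cases hobo : obo D cs none with
  | none =>
      have hbc : best.contains c = false := by
        rw [PySem.Dict.contains_eq_isSome_get?, hB, hobo]; rfl
      simp [emit, hbc]
  | some M =>
      have hbc : best.contains c = true := by
        rw [PySem.Dict.contains_eq_isSome_get?, hB, hobo]; rfl
      have hgd : best.getD c 0 = M := by
        rw [PySem.Dict.getD_eq_get?_getD, hB, hobo]; rfl
      dsimp only
      simp only [emit, hbc, if_true, hgd]
      rw [filter_and3 D.keys (fun d => decide (D.getD d 0 > 1)) (fun d => PySem.Str.len d == c)
        (fun d => D.getD d 0 == M), ← hcs]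

-- ===== VERDICT (by name: the statement is the Claim_ definition above) =====
theorem dictMax_spec : Claim_equal_dictMax := by
  intro dict course _
  exact dictMax_eq dict course
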